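-- pv_equiv track=rewrite | github.com/Arsen1302/Code-copy-detector | TestData/solutions/problem_733_4_1.py | solution_733_4_1
-- ===== SOURCE A (Python) =====
-- from typing import List
--
-- def solution_733_4_1(matrix: List[List[int]]) -> int:
--     def solution_733_4_2(alist):
--         olist = []
--         for v in alist:
--             olist.append(0 if v else 1)
--
--         return tuple(olist)
--
--     complementary_row_dict = {}
--     for row in matrix:
--         if not row[0]:
--             row = solution_733_4_2(row)
--         else:
--             row = tuple(row)
--
--         complementary_row_dict[row] = complementary_row_dict.get(row, 0) + 1
--
--     return max(complementary_row_dict.values())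
-- ===== SOURCE B (Python) =====
-- def solution_733_4_1(matrix):
--     canon = sorted(
--         tuple(row) if row[0] else tuple(0 if v else 1 for v in row)
--         for row in matrix
--     )
--     best = 0
--     run = 0
--     prev = None
--     for t in canon:
--         run = run + 1 if t == prev else 1
--         if run > best:
--             best = run
--         prev = t
--     return best
-- ===== Notes on version B (the rewrite author's own statement) =====
-- stated objective: alternative
-- what changed: B replaces A's hash-map counting with sort-then-scan: it canonicalizes each row exactly as A (flip iff first entry falsy), sorts the canonical tuples, and takes the longest run of consecutive equal tuples in one linear pass.
import Mathlib
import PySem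

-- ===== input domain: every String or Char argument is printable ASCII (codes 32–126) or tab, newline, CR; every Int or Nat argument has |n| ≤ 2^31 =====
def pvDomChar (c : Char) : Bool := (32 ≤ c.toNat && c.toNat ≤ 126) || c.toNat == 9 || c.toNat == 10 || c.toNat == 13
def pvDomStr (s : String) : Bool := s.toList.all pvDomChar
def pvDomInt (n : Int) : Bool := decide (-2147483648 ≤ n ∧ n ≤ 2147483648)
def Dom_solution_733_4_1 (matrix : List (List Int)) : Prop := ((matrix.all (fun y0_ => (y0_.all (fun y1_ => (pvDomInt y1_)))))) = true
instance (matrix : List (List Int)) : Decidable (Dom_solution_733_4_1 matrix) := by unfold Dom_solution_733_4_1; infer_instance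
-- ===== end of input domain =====

-- B replaces A's dict counting by sort-then-longest-run (same canonicalization of rows);
-- equivalence of the return values on nonempty matrices with nonempty rows is proved below.

-- ===== PORT A =====
-- inner helper solution_733_4_2: build olist by appending 0 if v else 1
def solution_733_4_2 (alist : List Int) : List Int :=
  alist.foldl (fun olist v => olist ++ [if v ≠ 0 then (0 : Int) else 1]) []

def solution_733_4_1 (matrix : List (List Int)) : Int :=
  let d : PySem.Dict (List Int) Int :=
    matrix.foldl (fun d row =>
      let row' := if PySem.List.pyGetD row 0 0 = 0 then solution_733_4_2 row else row
      d.insert row' (d.getD row' 0 + 1)) PySem.Dict.empty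
  -- max(d.values()); d is nonempty under Pre_ (matrix ≠ []), default never used
  (PySem.List.max? d.values (fun x => x)).getD 0

-- ===== PORT B =====
def solution_733_4_1_alt (matrix : List (List Int)) : Int :=
  let canon : List (List Int) :=
    -- sorted(canon): lexicographic order on the canonical tuples (the List-Int LinearOrder,
    -- named explicitly so the PySem order lemmas apply; same order as the default instance)
    @PySem.List.sorted (List Int) (List Int) List.instLinearOrder.toLT LinearOrder.toDecidableLT
      (matrix.map (fun row =>
        if PySem.List.pyGetD row 0 0 ≠ 0 then row
        else row.map (fun v => if v ≠ 0 then (0 : Int) else 1)))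
      (fun x => x) false
  -- one pass: run length of consecutive equal tuples, best run seen
  let st := canon.foldl
    (fun (st : Option (List Int) × Int × Int) t =>
      let run := if some t = st.1 then st.2.1 + 1 else 1
      let best := if run > st.2.2 then run else st.2.2
      (some t, run, best))
    (none, 0, 0)
  st.2.2

-- ===== PRECONDITION & SPEC =====
-- Pre_ excludes exactly the inputs where A raises: an empty matrix (ValueError from the
-- final max over no values) and any empty row (IndexError from indexing its first element).
def Pre_solution_733_4_1 (matrix : List (List Int)) : Prop :=
  matrix ≠ [] ∧ ∀ row ∈ matrix, row ≠ []
instance (matrix : List (List Int)) : Decidable (Pre_solution_733_4_1 matrix) := by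
  unfold Pre_solution_733_4_1; infer_instance

def pvWitness_solution_733_4_1 : List (List Int) := [[1, 0], [0, 1], [1, 0]]

def Spec_solution_733_4_1 (matrix : List (List Int)) (out : Int) : Prop := out = solution_733_4_1_alt matrix
instance (matrix : List (List Int)) (out : Int) : Decidable (Spec_solution_733_4_1 matrix out) := by unfold Spec_solution_733_4_1; infer_instance

-- ===== CLAIM (what is proved, stated in full; the proofs are below) =====
def Claim_equal_solution_733_4_1 : Prop := ∀ (matrix : List (List Int)), Dom_solution_733_4_1 matrix → Pre_solution_733_4_1 matrix → Spec_solution_733_4_1 matrix (solution_733_4_1 matrix)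

-- ===== LEMMAS AND PROOFS =====

-- the shared canonical key both programs compute for a row
def pvKey (row : List Int) : List Int :=
  if PySem.List.pyGetD row 0 0 = 0 then row.map (fun v => if v ≠ 0 then (0 : Int) else 1) else row

-- max of a list of (nonnegative) ints, 0 for []
def pvMx (l : List Int) : Int := l.foldr max 0

-- B's loop step
def pvStep (st : Option (List Int) × Int × Int) (t : List Int) : Option (List Int) × Int × Int :=
  let run := if some t = st.1 then st.2.1 + 1 else 1
  let best := if run > st.2.2 then run else st.2.2
  (some t, run, best)

lemma solution_733_4_2_eq (alist : List Int) :
    solution_733_4_2 alist = alist.map (fun v => if v ≠ 0 then (0 : Int) else 1) := by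
  simpa [solution_733_4_2] using
    PySem.List.foldl_append_singleton_eq_map (l := alist)
      (f := fun v => if v ≠ 0 then (0 : Int) else 1) (acc := [])

-- A's dict is the Counter of the canonical keys
lemma dictA_eq (matrix : List (List Int)) :
    matrix.foldl (fun d row =>
      let row' := if PySem.List.pyGetD row 0 0 = 0 then solution_733_4_2 row else row
      d.insert row' (d.getD row' 0 + 1)) PySem.Dict.empty
    = PySem.Dict.counter (matrix.map pvKey) := by
  rw [← PySem.Dict.foldl_insert_getD_add_one_eq_counter, List.foldl_map]
  apply PySem.List.foldl_congr_mem
  intro acc row _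
  simp only [pvKey, solution_733_4_2_eq]

-- max over counts of the distinct keys = max over counts at every position
lemma max_counts_eq (l : List (List Int)) (h : l ≠ []) :
    (PySem.List.max? ((PySem.Set.ofList l).map (fun k => (l.count k : Int))) (fun x => x)).getD 0
    = (PySem.List.max? (l.map (fun c => (l.count c : Int))) (fun x => x)).getD 0 := by
  obtain ⟨x, t, rfl⟩ := List.exists_cons_of_ne_nil h
  have h1 : ((PySem.Set.ofList (x :: t)).map (fun k => ((x :: t).count k : Int))) ≠ [] := by
    simp only [ne_eq, List.map_eq_nil_iff]
    intro hc
    have := PySem.Set.mem_ofList (x :: t) x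
    simp [hc] at this
  have h2 : ((x :: t).map (fun c => ((x :: t).count c : Int))) ≠ [] := by simp
  obtain ⟨a, ha⟩ : ∃ a, PySem.List.max?
      ((PySem.Set.ofList (x :: t)).map (fun k => ((x :: t).count k : Int)))
      (fun x => x) = some a :=
    Option.ne_none_iff_exists'.mp
      (fun hn => h1 ((PySem.List.max?_eq_none_iff
        ((PySem.Set.ofList (x :: t)).map (fun k => ((x :: t).count k : Int)))
        (fun x => x)).mp hn))
  obtain ⟨b, hb⟩ : ∃ b, PySem.List.max?
      ((x :: t).map (fun c => ((x :: t).count c : Int)))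
      (fun x => x) = some b :=
    Option.ne_none_iff_exists'.mp
      (fun hn => h2 ((PySem.List.max?_eq_none_iff
        ((x :: t).map (fun c => ((x :: t).count c : Int)))
        (fun x => x)).mp hn))
  rw [ha, hb]
  have hamem := PySem.List.max?_mem ha
  have hbmem := PySem.List.max?_mem hb
  have hamax := PySem.List.max?_isMax ha
  have hbmax := PySem.List.max?_isMax hb
  simp only [List.mem_map] at hamem hbmem
  obtain ⟨k, hk, rfl⟩ := hamem
  obtain ⟨c, hc, rfl⟩ := hbmem
  have hk' : k ∈ x :: t := (PySem.Set.mem_ofList _ _).mp hk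
  have hc' : c ∈ PySem.Set.ofList (x :: t) := (PySem.Set.mem_ofList _ _).mpr hc
  have hle1 : ((x :: t).count k : Int) ≤ ((x :: t).count c : Int) :=
    hbmax _ (List.mem_map.mpr ⟨k, hk', rfl⟩)
  have hle2 : ((x :: t).count c : Int) ≤ ((x :: t).count k : Int) :=
    hamax _ (List.mem_map.mpr ⟨c, hc', rfl⟩)
  simp only [Option.getD_some]
  omega

lemma mem_le_mx (l : List Int) (a : Int) (h : a ∈ l) : a ≤ pvMx l := by
  induction l with
  | nil => cases h
  | cons x t ih =>
    simp only [pvMx, List.foldr] at *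
    rcases List.mem_cons.mp h with rfl | h'
    · exact le_max_left _ _
    · exact le_trans (ih h') (le_max_right _ _)

lemma mx_le (l : List Int) (m : Int) (hm : 0 ≤ m) (h : ∀ a ∈ l, a ≤ m) : pvMx l ≤ m := by
  induction l with
  | nil => simpa [pvMx]
  | cons x t ih =>
    simp only [pvMx, List.foldr] at *
    exact max_le (h x (by simp)) (ih (fun a ha => h a (by simp [ha])))

-- getD-of-first-max equals foldr-max for a list of nonnegative ints
lemma max?_getD_eq_mx (l : List Int) (h : ∀ a ∈ l, 0 ≤ a) :
    (PySem.List.max? l (fun x => x)).getD 0 = pvMx l := by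
  cases hl : PySem.List.max? l (fun x => x) with
  | none =>
    have : l = [] := (PySem.List.max?_eq_none_iff l (fun x => x)).mp hl
    simp [this, pvMx]
  | some m =>
    have hmem := PySem.List.max?_mem hl
    have hmax := PySem.List.max?_isMax hl
    have h1 : m ≤ pvMx l := mem_le_mx l m hmem
    have h2 : pvMx l ≤ m := mx_le l m (h m hmem) hmax
    simp only [Option.getD_some]
    omega

lemma mx_perm (l₁ l₂ : List Int) (h : l₁.Perm l₂) : pvMx l₁ = pvMx l₂ := by
  induction h with
  | nil => rfl
  | cons x _ ih => simp only [pvMx, List.foldr] at *; rw [ih]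
  | swap x y l => simp only [pvMx, List.foldr]; rw [← max_assoc, ← max_assoc, max_comm y x]
  | trans _ _ ih₁ ih₂ => exact ih₁.trans ih₂

-- core invariant: scanning a sorted tail from a live run of r copies of x
lemma scan_invariant (s : List (List Int)) (hs : s.Pairwise (· ≤ ·)) :
    ∀ (x : List Int) (r b : Int), (∀ y ∈ s, x ≤ y) → 1 ≤ r → r ≤ b →
    (s.foldl pvStep (some x, r, b)).2.2
      = max b (pvMx (s.map (fun k => (s.count k : Int) + if k = x then r else 0))) := by
  induction s with
  | nil =>
    intro x r b _ h1 h2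
    simp only [List.foldl, List.map, pvMx, List.foldr]
    omega
  | cons y t ih =>
    intro x r b hle h1 h2
    have hpt : t.Pairwise (· ≤ ·) := (List.pairwise_cons.mp hs).2
    have hyt : ∀ z ∈ t, y ≤ z := (List.pairwise_cons.mp hs).1
    by_cases hxy : y = x
    · -- run continues
      subst hxy
      have hstep : pvStep (some y, r, b) y = (some y, r + 1, max b (r + 1)) := by
        simp [pvStep]
        omega
      rw [List.foldl_cons, hstep,
          ih hpt y (r + 1) (max b (r + 1)) hyt (by omega) (le_max_right _ _)]
      -- rewrite the count functions
      have hmapeq : ((y :: t).map (fun k => ((y :: t).count k : Int) + if k = y then r else 0))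
          = ((t.count y : Int) + 1 + r)
            :: (t.map (fun k => (t.count k : Int) + if k = y then r + 1 else 0)) := by
        simp only [List.map_cons]
        congr 1
        · simp [List.count_cons]
        · apply List.map_congr_left
          intro k _
          by_cases hk : k = y
          · subst hk; simp [List.count_cons]; omega
          · have hyk : ¬ y = k := fun h => hk h.symm
            simp [hk, hyk]
      rw [hmapeq]
      simp only [pvMx, List.foldr]
      set S := (t.map (fun k => (t.count k : Int) + if k = y then r + 1 else 0)).foldr max 0 with hS
      by_cases hyint : y ∈ t
      · have hterm : (t.count y : Int) + (r + 1) ≤ S := by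
          apply mem_le_mx
          exact List.mem_map.mpr ⟨y, hyint, by simp⟩
        have hr1 : r + 1 ≤ S := by
          have : (0 : Int) ≤ (t.count y : Int) := by positivity
          omega
        omega
      · have hcnt0 : (t.count y : Int) = 0 := by
          simp [List.count_eq_zero_of_not_mem hyint]
        rw [hcnt0]
        have : max (r + 1) S = max (0 + 1 + r) S := by
          congr 1; omega
        omega
    · -- new run starts
      have hxy' : x < y := lt_of_le_of_ne (hle y (by simp)) (fun h => hxy h.symm)
      have hstep : pvStep (some x, r, b) y = (some y, 1, b) := by
        simp [pvStep, hxy]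
        omega
      rw [List.foldl_cons, hstep,
          ih hpt y 1 b hyt (by omega) (by omega)]
      -- x occurs nowhere in y :: t, so the "if k = x" terms vanish
      have hxnot : ∀ k ∈ y :: t, k ≠ x := by
        intro k hk
        rcases List.mem_cons.mp hk with rfl | hk'
        · exact fun h => hxy h
        · exact fun h => absurd (h ▸ hyt k hk') (not_le.mpr hxy')
      have hmapeq : ((y :: t).map (fun k => ((y :: t).count k : Int) + if k = x then r else 0))
          = ((t.count y : Int) + 1)
            :: (t.map (fun k => (t.count k : Int) + if k = y then 1 else 0)) := by
        simp only [List.map_cons]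
        congr 1
        · simp [hxnot y (by simp)]
        · apply List.map_congr_left
          intro k hk
          have hkx : ¬ k = x := hxnot k (by simp [hk])
          by_cases hky : k = y
          · subst hky; simp [hkx]
          · have hyk : ¬ y = k := fun h => hky h.symm
            simp [hkx, hky, hyk]
      rw [hmapeq]
      simp only [pvMx, List.foldr]
      set S := (t.map (fun k => (t.count k : Int) + if k = y then 1 else 0)).foldr max 0 with hS
      by_cases hyint : y ∈ t
      · have hterm : (t.count y : Int) + 1 ≤ S := by
          apply mem_le_mx
          exact List.mem_map.mpr ⟨y, hyint, by simp⟩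
        omega
      · have hcnt0 : (t.count y : Int) = 0 := by
          simp [List.count_eq_zero_of_not_mem hyint]
        rw [hcnt0]
        omega

-- B's scan over a sorted list computes the max multiplicity
lemma scan_eq_mx (s : List (List Int)) (hs : s.Pairwise (· ≤ ·)) :
    (s.foldl pvStep (none, 0, 0)).2.2 = pvMx (s.map (fun k => (s.count k : Int))) := by
  cases s with
  | nil => rfl
  | cons y t =>
    have hpt : t.Pairwise (· ≤ ·) := (List.pairwise_cons.mp hs).2
    have hyt : ∀ z ∈ t, y ≤ z := (List.pairwise_cons.mp hs).1
    have hstep : pvStep (none, 0, 0) y = (some y, 1, 1) := by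
      simp [pvStep]
    rw [List.foldl_cons, hstep,
        scan_invariant t hpt y 1 1 hyt (by omega) (by omega)]
    have hmapeq : ((y :: t).map (fun k => ((y :: t).count k : Int)))
        = ((t.count y : Int) + 1)
          :: (t.map (fun k => (t.count k : Int) + if k = y then 1 else 0)) := by
      simp only [List.map_cons]
      congr 1
      · simp [List.count_cons]
      · apply List.map_congr_left
        intro k _
        by_cases hky : k = y
        · subst hky; simp
        · have hyk : ¬ y = k := fun h => hky h.symm
          simp [hky, hyk]
    rw [hmapeq]
    simp only [pvMx, List.foldr]
    set S := (t.map (fun k => (t.count k : Int) + if k = y then 1 else 0)).foldr max 0 with hS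
    by_cases hyint : y ∈ t
    · have hterm : (t.count y : Int) + 1 ≤ S := by
        apply mem_le_mx
        exact List.mem_map.mpr ⟨y, hyint, by simp⟩
      omega
    · have hcnt0 : (t.count y : Int) = 0 := by
        simp [List.count_eq_zero_of_not_mem hyint]
      rw [hcnt0]
      omega

-- ===== VERDICT (by name: the statement is the Claim_ definition above) =====
theorem solution_733_4_1_spec : Claim_equal_solution_733_4_1 := by
  intro matrix _ hpre
  unfold Spec_solution_733_4_1
  simp only [solution_733_4_1, solution_733_4_1_alt]
  set canon0 : List (List Int) := matrix.map pvKey with hc0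
  have hkey : (matrix.map (fun row =>
      if PySem.List.pyGetD row 0 0 ≠ 0 then row
      else row.map (fun v => if v ≠ 0 then (0 : Int) else 1))) = canon0 := by
    apply List.map_congr_left
    intro row _
    simp only [pvKey, ne_eq, ite_not]
  rw [dictA_eq, hkey]
  set s := @PySem.List.sorted (List Int) (List Int) List.instLinearOrder.toLT
      LinearOrder.toDecidableLT canon0 (fun x => x) false with hsdef
  have hperm : s.Perm canon0 :=
    @PySem.List.sorted_perm (List Int) (List Int) List.instLinearOrder.toLT
      LinearOrder.toDecidableLT canon0 (fun x => x) false
  have hsorted : s.Pairwise (· ≤ ·) :=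
    PySem.List.sorted_pairwise canon0 (fun x => x)
  have hnil : canon0 ≠ [] := by simpa [hc0] using hpre.1
  -- A's side down to pvMx of counts over canon0
  have hvals : (PySem.Dict.counter canon0).values
      = (PySem.Set.ofList canon0).map (fun k => (canon0.count k : Int)) := by
    simp [PySem.Dict.values, PySem.Dict.items_counter, List.map_map, Function.comp]
  rw [hvals, max_counts_eq canon0 hnil,
      max?_getD_eq_mx _ (by intro a ha; obtain ⟨c, _, rfl⟩ := List.mem_map.mp ha; positivity)]
  -- B's side down to pvMx of counts over s
  have hB : (s.foldl
      (fun (st : Option (List Int) × Int × Int) t =>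
        let run := if some t = st.1 then st.2.1 + 1 else 1
        let best := if run > st.2.2 then run else st.2.2
        (some t, run, best))
      (none, 0, 0)).2.2 = pvMx (s.map (fun k => (s.count k : Int))) :=
    scan_eq_mx s hsorted
  rw [hB]
  -- counts agree under the permutation
  have hmap : s.map (fun k => (s.count k : Int)) = s.map (fun k => (canon0.count k : Int)) := by
    apply List.map_congr_left
    intro k _
    rw [hperm.count_eq]
  rw [hmap]
  exact (mx_perm _ _ (hperm.map _)).symm
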